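-- pv_equiv track=rewrite | github.com/DiamondLightSource/Opt-ID | IDSort/src/v2/id_setup.py | create_flip_matrix_list_symmetric_apple_q4
-- ===== SOURCE A (Python) =====
-- def create_flip_matrix_list_symmetric_apple_q4(nperiods):
--     flip = []
--     for i in range(0, (4 * nperiods - 1) - 3, 4):
--         flip.append(((-1,0,0),(0,-1,0),(0,0,1)))
--         flip.append(((1,0,0),(0,1,0),(0,0,1)))
--         flip.append(((-1,0,0),(0,-1,0),(0,0,1)))
--         flip.append(((1,0,0),(0,1,0),(0,0,1)))
--
--     # Append last elements
--     flip.append(((-1,0,0),(0,-1,0),(0,0,1)))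
--     flip.append(((1,0,0),(0,1,0),(0,0,1)))
--     flip.append(((-1,0,0),(0,-1,0),(0,0,1)))
--     return flip
-- ===== SOURCE B (Python) =====
-- def create_flip_matrix_list_symmetric_apple_q4(nperiods):
--     a = ((-1, 0, 0), (0, -1, 0), (0, 0, 1))
--     b = ((1, 0, 0), (0, 1, 0), (0, 0, 1))
--     count = 4 * max(nperiods - 1, 0) + 3
--     return [a if i % 2 == 0 else b for i in range(count)]
-- ===== Notes on version B (the rewrite author's own statement) =====
-- stated objective: simpler
-- what changed: Replaces the unrolled four-appends-per-chunk loop plus three-append tail by a single parity-driven comprehension over a closed-form total count: element i is matrix a when i is even, b when odd.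
import Mathlib
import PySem

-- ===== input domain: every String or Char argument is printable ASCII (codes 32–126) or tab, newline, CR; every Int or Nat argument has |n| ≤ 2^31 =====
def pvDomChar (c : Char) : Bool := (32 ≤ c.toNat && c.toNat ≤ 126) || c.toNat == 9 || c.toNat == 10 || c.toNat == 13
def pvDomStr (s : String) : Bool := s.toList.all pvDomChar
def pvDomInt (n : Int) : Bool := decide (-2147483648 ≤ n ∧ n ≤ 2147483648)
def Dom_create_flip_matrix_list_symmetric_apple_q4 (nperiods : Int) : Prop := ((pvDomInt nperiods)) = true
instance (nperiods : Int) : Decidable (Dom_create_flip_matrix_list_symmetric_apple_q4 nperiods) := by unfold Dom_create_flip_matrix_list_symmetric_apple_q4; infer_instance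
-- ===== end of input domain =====

-- B replaces A's unrolled four-appends-per-chunk loop + three-append tail by one
-- parity-driven comprehension over a closed-form count; same values, simpler decomposition.

-- ===== PORT A =====
def create_flip_matrix_list_symmetric_apple_q4 (nperiods : Int) : List ((Int × Int × Int) × (Int × Int × Int) × (Int × Int × Int)) :=
  let flip : List ((Int × Int × Int) × (Int × Int × Int) × (Int × Int × Int)) :=
    (PySem.List.pyRange 0 ((4 * nperiods - 1) - 3) 4).foldl
      (fun flip _i =>
        ((((flip ++ [((-1,0,0),(0,-1,0),(0,0,1))])
             ++ [((1,0,0),(0,1,0),(0,0,1))])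
             ++ [((-1,0,0),(0,-1,0),(0,0,1))])
             ++ [((1,0,0),(0,1,0),(0,0,1))])) []
  -- Append last elements
  ((flip ++ [((-1,0,0),(0,-1,0),(0,0,1))])
        ++ [((1,0,0),(0,1,0),(0,0,1))])
        ++ [((-1,0,0),(0,-1,0),(0,0,1))]

-- ===== PORT B =====
def create_flip_matrix_list_symmetric_apple_q4_alt (nperiods : Int) : List ((Int × Int × Int) × (Int × Int × Int) × (Int × Int × Int)) :=
  let a : (Int × Int × Int) × (Int × Int × Int) × (Int × Int × Int) := ((-1,0,0),(0,-1,0),(0,0,1))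
  let b : (Int × Int × Int) × (Int × Int × Int) × (Int × Int × Int) := ((1,0,0),(0,1,0),(0,0,1))
  let count : Int := 4 * max (nperiods - 1) 0 + 3
  -- [a if i % 2 == 0 else b for i in range(count)]; count > 0 always, so range = List.range count.toNat
  (List.range count.toNat).map (fun i => if i % 2 = 0 then a else b)

-- ===== PRECONDITION & SPEC =====
def Spec_create_flip_matrix_list_symmetric_apple_q4 (nperiods : Int) (out : List ((Int × Int × Int) × (Int × Int × Int) × (Int × Int × Int))) : Prop := out = create_flip_matrix_list_symmetric_apple_q4_alt nperiods
instance (nperiods : Int) (out : List ((Int × Int × Int) × (Int × Int × Int) × (Int × Int × Int))) : Decidable (Spec_create_flip_matrix_list_symmetric_apple_q4 nperiods out) := by unfold Spec_create_flip_matrix_list_symmetric_apple_q4; infer_instance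

-- ===== CLAIM (what is proved, stated in full; the proofs are below) =====
def Claim_equal_create_flip_matrix_list_symmetric_apple_q4 : Prop := ∀ (nperiods : Int), Dom_create_flip_matrix_list_symmetric_apple_q4 nperiods → Spec_create_flip_matrix_list_symmetric_apple_q4 nperiods (create_flip_matrix_list_symmetric_apple_q4 nperiods)

-- ===== LEMMAS AND PROOFS =====

-- the flip matrices, named for the proofs
def pvA : (Int × Int × Int) × (Int × Int × Int) × (Int × Int × Int) := ((-1,0,0),(0,-1,0),(0,0,1))
def pvB : (Int × Int × Int) × (Int × Int × Int) × (Int × Int × Int) := ((1,0,0),(0,1,0),(0,0,1))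

-- the body of A's loop, repeated m times
def patA : Nat → List ((Int × Int × Int) × (Int × Int × Int) × (Int × Int × Int))
  | 0 => []
  | m+1 => [pvA, pvB, pvA, pvB] ++ patA m

-- pairs [a,b] repeated m times
def pat2 : Nat → List ((Int × Int × Int) × (Int × Int × Int) × (Int × Int × Int))
  | 0 => []
  | m+1 => [pvA, pvB] ++ pat2 m

theorem foldA (l : List Int)
    (init : List ((Int × Int × Int) × (Int × Int × Int) × (Int × Int × Int))) :
    l.foldl (fun flip _i =>
      ((((flip ++ [((-1,0,0),(0,-1,0),(0,0,1))])
           ++ [((1,0,0),(0,1,0),(0,0,1))])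
           ++ [((-1,0,0),(0,-1,0),(0,0,1))])
           ++ [((1,0,0),(0,1,0),(0,0,1))])) init = init ++ patA l.length := by
  induction l generalizing init with
  | nil => simp [patA]
  | cons x xs ih =>
      simp only [List.foldl_cons, ih, List.length_cons, patA]
      simp [pvA, pvB]

theorem patA_pat2 (k : Nat) :
    patA k ++ [pvA, pvB, pvA] = pat2 (2*k+1) ++ [pvA] := by
  induction k with
  | zero => rfl
  | succ k ih =>
      have h2 : 2*(k+1)+1 = ((2*k+1)+1)+1 := by omega
      rw [h2]
      simp only [patA, pat2, List.append_assoc] at ih ⊢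
      rw [ih]
      rfl

theorem pat2_comm (m : Nat) :
    pat2 m ++ [pvA, pvB] = [pvA, pvB] ++ pat2 m := by
  induction m with
  | zero => rfl
  | succ m ih =>
      simp only [pat2, List.append_assoc] at ih ⊢
      rw [ih]

theorem mapB (m : Nat) :
    (List.range (2*m+1)).map
      (fun i => if i % 2 = 0 then pvA else pvB) = pat2 m ++ [pvA] := by
  induction m with
  | zero => decide
  | succ m ih =>
      have h2 : 2*(m+1)+1 = ((2*m+1)+1)+1 := by omega
      rw [h2, List.range_succ, List.range_succ]
      simp only [List.map_append, ih]
      have ho : ((2*m+1) % 2 = 0) = False := by simp [Nat.add_mod]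
      have he : (((2*m+1)+1) % 2 = 0) = True := by simp [Nat.add_mod]
      simp only [List.map_cons, List.map_nil, ho, he, if_true, if_false]
      have : pat2 m ++ [pvA] ++ [pvB] ++ [pvA] = (pat2 m ++ [pvA, pvB]) ++ [pvA] := by
        simp
      rw [this, pat2_comm]
      simp [pat2]

-- ===== VERDICT (by name: the statement is the Claim_ definition above) =====
theorem create_flip_matrix_list_symmetric_apple_q4_spec : Claim_equal_create_flip_matrix_list_symmetric_apple_q4 := by
  intro n _hdom
  unfold Spec_create_flip_matrix_list_symmetric_apple_q4
  unfold create_flip_matrix_list_symmetric_apple_q4 create_flip_matrix_list_symmetric_apple_q4_alt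
  simp only []
  rw [foldA]
  have hlenA : (PySem.List.pyRange 0 ((4*n-1)-3) 4).length = (n-1).toNat := by
    rw [PySem.List.pyRange_of_pos 0 ((4*n-1)-3) (by norm_num)]
    simp only [List.length_map, List.length_range]
    split_ifs with h <;> omega
  rw [hlenA]
  have hcnt : (4 * max (n - 1) 0 + 3).toNat = 2 * (2 * (n-1).toNat + 1) + 1 := by
    omega
  rw [hcnt]
  have hm := mapB (2*(n-1).toNat+1)
  have hp := patA_pat2 (n-1).toNat
  simp only [pvA, pvB] at hm hp
  rw [hm, ← hp]
  simp
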